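-- pv_equiv track=rewrite | github.com/iss-research-team/cnc_KG-tech_point | 3.expand-no-bert/0.dataset_make.py | overlap_check
-- ===== SOURCE A (Python) =====
-- def overlap_check(node_list):
--     """
--     时间有限，这边只进行简的check
--     :param node_list:
--     :return:
--     """
--     check = True
--     num_node = len(node_list)
--     for i in range(0, num_node - 1):
--         for j in range(i + 1, num_node):
--             # 两个子串的index有交集认为是重叠
--             if set(node_list[i]) & set(node_list[j]):
--                 check = False
--                 break
--     return check
-- ===== SOURCE B (Python) =====
-- def overlap_check(node_list):
--     seen = set()
--     for node in node_list:
--         s = set(node)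
--         if s & seen:
--             return False
--         seen |= s
--     return True
-- ===== Notes on version B (the rewrite author's own statement) =====
-- stated objective: faster
-- what changed: Replaces A's nested loop over all node pairs with set intersections by a single pass that keeps one global set of seen elements and reports overlap as soon as a node contains an already-seen element.
import Mathlib
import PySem

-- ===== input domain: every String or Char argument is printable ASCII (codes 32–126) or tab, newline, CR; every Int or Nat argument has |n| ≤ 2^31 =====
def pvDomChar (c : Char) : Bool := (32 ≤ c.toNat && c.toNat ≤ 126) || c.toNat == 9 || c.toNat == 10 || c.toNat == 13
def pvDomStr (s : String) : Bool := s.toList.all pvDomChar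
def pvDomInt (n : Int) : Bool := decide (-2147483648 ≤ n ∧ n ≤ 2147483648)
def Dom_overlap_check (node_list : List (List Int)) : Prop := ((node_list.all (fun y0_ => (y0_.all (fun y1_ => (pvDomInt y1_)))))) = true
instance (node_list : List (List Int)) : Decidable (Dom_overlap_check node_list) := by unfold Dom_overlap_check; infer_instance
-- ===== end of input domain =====

-- B replaces A's O(n^2) pairwise set-intersection scan by one pass with a global seen-element set.

-- ===== PORT A =====
-- inner 'for j in range(i+1, num_node)' with its break-on-first-overlap
def overlapInnerA (node_list : List (List Int)) (i : Int) : List Int → Bool → Bool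
  | [], check => check
  | j :: rest, check =>
      if PySem.Set.inter (PySem.Set.ofList (PySem.List.pyGetD node_list i []))
           (PySem.Set.ofList (PySem.List.pyGetD node_list j [])) ≠ [] then
        false   -- check = False; break
      else overlapInnerA node_list i rest check

def overlap_check (node_list : List (List Int)) : Bool :=
  let num_node : Int := node_list.length
  (PySem.List.pyRange 0 (num_node - 1) 1).foldl
    (fun check i => overlapInnerA node_list i (PySem.List.pyRange (i + 1) num_node 1) check)
    true

-- ===== PORT B =====
def overlapAltLoop : PySem.Set Int → List (List Int) → Bool
  | _, [] => true
  | seen, node :: rest =>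
      let s := PySem.Set.ofList node
      if PySem.Set.inter s seen ≠ [] then false
      else overlapAltLoop (PySem.Set.union seen s) rest

def overlap_check_alt (node_list : List (List Int)) : Bool :=
  overlapAltLoop PySem.Set.empty node_list

-- ===== PRECONDITION & SPEC =====
def Spec_overlap_check (node_list : List (List Int)) (out : Bool) : Prop := out = overlap_check_alt node_list
instance (node_list : List (List Int)) (out : Bool) : Decidable (Spec_overlap_check node_list out) := by unfold Spec_overlap_check; infer_instance

-- ===== CLAIM (what is proved, stated in full; the proofs are below) =====
def Claim_equal_overlap_check : Prop := ∀ (node_list : List (List Int)), Dom_overlap_check node_list → Spec_overlap_check node_list (overlap_check node_list)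

-- ===== LEMMAS AND PROOFS =====

-- the common meaning: two nodes share no element
def NDisj (a b : List Int) : Prop := ∀ v ∈ a, v ∉ b

lemma inter_ofList_eq_nil_iff (a b : List Int) :
    PySem.Set.inter (PySem.Set.ofList a) (PySem.Set.ofList b) = [] ↔ NDisj a b := by
  rw [List.eq_nil_iff_forall_not_mem]
  constructor
  · intro h v hva hvb
    exact h v (by rw [PySem.Set.mem_inter]; simp [PySem.Set.mem_ofList, hva, hvb])
  · intro h v hv
    rw [PySem.Set.mem_inter, PySem.Set.mem_ofList, PySem.Set.mem_ofList] at hv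
    exact h v hv.1 hv.2

lemma overlapInnerA_true_iff (nl : List (List Int)) (i : Int) (js : List Int) (check : Bool) :
    overlapInnerA nl i js check = true ↔
      check = true ∧ ∀ j ∈ js, NDisj (PySem.List.pyGetD nl i []) (PySem.List.pyGetD nl j []) := by
  induction js with
  | nil => simp [overlapInnerA]
  | cons j rest ih =>
    simp only [overlapInnerA]
    split
    · rename_i h
      constructor
      · intro hc; cases hc
      · rintro ⟨-, hall⟩
        exact absurd ((inter_ofList_eq_nil_iff _ _).mpr (hall j (List.mem_cons_self ..))) h
    · rename_i h
      rw [not_not, inter_ofList_eq_nil_iff] at h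
      rw [ih]
      simp only [List.mem_cons]
      constructor
      · rintro ⟨hc, hall⟩
        exact ⟨hc, fun j' hj' => hj'.elim (fun e => e ▸ h) (hall j')⟩
      · rintro ⟨hc, hall⟩
        exact ⟨hc, fun j' hj' => hall j' (Or.inr hj')⟩

lemma overlapOuterA_true_iff (nl : List (List Int)) (n : Int) (is' : List Int) (check : Bool) :
    is'.foldl (fun check i => overlapInnerA nl i (PySem.List.pyRange (i + 1) n 1) check) check = true ↔
      check = true ∧ ∀ i ∈ is', ∀ j ∈ PySem.List.pyRange (i + 1) n 1,
        NDisj (PySem.List.pyGetD nl i []) (PySem.List.pyGetD nl j []) := by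
  induction is' generalizing check with
  | nil => simp
  | cons i rest ih =>
    simp only [List.foldl_cons, ih, overlapInnerA_true_iff, List.mem_cons]
    constructor
    · rintro ⟨⟨hc, hi⟩, hrest⟩
      exact ⟨hc, fun i' hi' => hi'.elim (fun e => e ▸ hi) (hrest i')⟩
    · rintro ⟨hc, hall⟩
      exact ⟨⟨hc, hall i (Or.inl rfl)⟩, fun i' hi' => hall i' (Or.inr hi')⟩

lemma overlapAltLoop_true_iff (xs : List (List Int)) (seen : PySem.Set Int) :
    overlapAltLoop seen xs = true ↔
      (∀ nd ∈ xs, ∀ v ∈ nd, v ∉ seen) ∧ xs.Pairwise NDisj := by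
  induction xs generalizing seen with
  | nil => simp [overlapAltLoop]
  | cons node rest ih =>
    simp only [overlapAltLoop]
    split
    · rename_i h
      constructor
      · intro hc; cases hc
      · rintro ⟨hseen, -⟩
        refine absurd (List.eq_nil_iff_forall_not_mem.mpr fun v hv => ?_) h
        rw [PySem.Set.mem_inter, PySem.Set.mem_ofList] at hv
        exact hseen node (List.mem_cons_self ..) v hv.1 hv.2
    · rename_i h
      rw [not_not, List.eq_nil_iff_forall_not_mem] at h
      rw [ih]
      simp only [List.pairwise_cons, List.mem_cons]
      constructor
      · rintro ⟨hseen, hpw⟩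
        refine ⟨?_, ?_, hpw⟩
        · rintro nd (rfl | hnd) v hv hvs
          · exact h v (by rw [PySem.Set.mem_inter, PySem.Set.mem_ofList]; exact ⟨hv, hvs⟩)
          · exact hseen nd hnd v hv (by rw [PySem.Set.mem_union]; exact Or.inl hvs)
        · intro nd hnd v hv hvnd
          exact hseen nd hnd v hvnd (by rw [PySem.Set.mem_union, PySem.Set.mem_ofList]; exact Or.inr hv)
      · rintro ⟨hseen, hfst, hpw⟩
        refine ⟨?_, hpw⟩
        intro nd hnd v hv hvs
        rw [PySem.Set.mem_union, PySem.Set.mem_ofList] at hvs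
        rcases hvs with hvs | hvs
        · exact hseen nd (Or.inr hnd) v hv hvs
        · exact hfst nd hnd v hvs hv

lemma pairwise_iff_index (nl : List (List Int)) :
    nl.Pairwise NDisj ↔
      ∀ i ∈ PySem.List.pyRange 0 ((nl.length : Int) - 1) 1,
        ∀ j ∈ PySem.List.pyRange (i + 1) (nl.length : Int) 1,
          NDisj (PySem.List.pyGetD nl i []) (PySem.List.pyGetD nl j []) := by
  rw [List.pairwise_iff_getElem]
  constructor
  · intro h i hi j hj
    rw [PySem.List.mem_pyRange_one] at hi hj
    have hi0 : 0 ≤ i := hi.1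
    have hj0 : 0 ≤ j := le_trans (by omega) hj.1
    have hiL : i.toNat < nl.length := by omega
    have hjL : j.toNat < nl.length := by omega
    have hij : i.toNat < j.toNat := by omega
    have := h i.toNat j.toNat hiL hjL hij
    rwa [PySem.List.pyGetD_eq_getElem nl [] hi0 (by omega), PySem.List.pyGetD_eq_getElem nl [] hj0 (by omega)]
  · intro h i j hi hj hij
    have hmi : (i : Int) ∈ PySem.List.pyRange 0 ((nl.length : Int) - 1) 1 := by
      rw [PySem.List.mem_pyRange_one]; omega
    have hmj : (j : Int) ∈ PySem.List.pyRange ((i : Int) + 1) (nl.length : Int) 1 := by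
      rw [PySem.List.mem_pyRange_one]; omega
    have := h i hmi j hmj
    rw [PySem.List.pyGetD_eq_getElem nl [] (by omega) (by exact_mod_cast hi),
        PySem.List.pyGetD_eq_getElem nl [] (by omega) (by exact_mod_cast hj)] at this
    simpa using this

-- ===== VERDICT (by name: the statement is the Claim_ definition above) =====
theorem overlap_check_spec : Claim_equal_overlap_check := by
  intro nl _
  unfold Spec_overlap_check
  have hA := overlapOuterA_true_iff nl (nl.length : Int)
      (PySem.List.pyRange 0 ((nl.length : Int) - 1) 1) true
  have hB := overlapAltLoop_true_iff nl PySem.Set.empty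
  have hAiff : overlap_check nl = true ↔ overlap_check_alt nl = true := by
    rw [overlap_check, overlap_check_alt, hA, hB, pairwise_iff_index]
    simp [PySem.Set.empty]
  cases hcb : overlap_check_alt nl
  · cases hca : overlap_check nl
    · rfl
    · exact absurd (hAiff.mp hca) (by simp [hcb])
  · exact hAiff.mpr hcb
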